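-- pv_equiv track=rewrite | github.com/minhtri6179/160Question | hashMap/tournamentWin.py | tourWin1
-- ===== SOURCE A (Python) =====
-- def tourWin1(arr, target):
--     table = {}
--     teamWin = ''
--     for i in range(len(arr)):
--         if target[i] == 0:
--             if arr[i][1] in table:
--                 table[arr[i][1]] += 1
--                 teamWin = arr[i][1]
--             else:
--                 table[arr[i][1]] = 1
--         else:
--             if arr[i][0] in table:
--                 table[arr[i][0]] += 1
--                 teamWin = arr[i][0]
--             else:
--                 table[arr[i][0]] = 1
--
--     return teamWin
-- ===== SOURCE B (Python) =====
-- def tourWin1(arr, target):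
--     winners = []
--     for i in range(len(arr)):
--         winners.append(arr[i][1] if target[i] == 0 else arr[i][0])
--     first = {}
--     for i, w in enumerate(winners):
--         if w not in first:
--             first[w] = i
--     for i in range(len(winners) - 1, -1, -1):
--         if first[winners[i]] < i:
--             return winners[i]
--     return ''
-- ===== Notes on version B (the rewrite author's own statement) =====
-- stated objective: alternative
-- what changed: Replaces the single forward pass carrying a count table and a running answer by a three-stage decomposition: build the winners list, index each winner's first occurrence in a dict, then scan backwards and return the first winner that repeats an earlier one.
import Mathlib
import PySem

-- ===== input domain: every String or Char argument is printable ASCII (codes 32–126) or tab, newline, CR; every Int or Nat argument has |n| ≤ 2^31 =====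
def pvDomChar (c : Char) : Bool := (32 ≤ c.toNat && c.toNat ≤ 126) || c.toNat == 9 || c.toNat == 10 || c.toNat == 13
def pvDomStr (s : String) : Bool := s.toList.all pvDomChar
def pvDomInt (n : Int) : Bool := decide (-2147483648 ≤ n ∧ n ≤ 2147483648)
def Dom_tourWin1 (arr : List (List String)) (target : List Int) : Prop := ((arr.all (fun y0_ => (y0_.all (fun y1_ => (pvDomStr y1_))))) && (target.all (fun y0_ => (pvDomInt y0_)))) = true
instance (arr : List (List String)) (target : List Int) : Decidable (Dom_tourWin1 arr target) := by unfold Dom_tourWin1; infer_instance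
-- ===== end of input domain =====

-- B replaces A's single forward pass (count table + running answer) by a three-stage
-- decomposition: winners list, first-occurrence index, backward scan; equal result.

-- ===== PORT A =====
def tourWin1 (arr : List (List String)) (target : List Int) : String :=
  ((PySem.List.pyRange 0 (PySem.List.len arr) 1).foldl
    (fun (st : PySem.Dict String Int × String) i =>
      if PySem.List.pyGetD target i 0 == 0 then
        let w := PySem.List.pyGetD (PySem.List.pyGetD arr i []) 1 ""
        if st.1.contains w then (st.1.insert w (st.1.getD w 0 + 1), w)
        else (st.1.insert w 1, st.2)
      else
        let w := PySem.List.pyGetD (PySem.List.pyGetD arr i []) 0 ""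
        if st.1.contains w then (st.1.insert w (st.1.getD w 0 + 1), w)
        else (st.1.insert w 1, st.2))
    (PySem.Dict.empty, "")).2

-- ===== PORT B =====
-- backward loop 'for i in range(len(winners)-1, -1, -1)': structural countdown on the index.
-- 'first[winners[i]]' is ported as getD _ 0; the key is always present (every winner was inserted).
def pvScanBack (first : PySem.Dict String Int) (winners : List String) : Nat → String
  | 0 => ""
  | n + 1 =>
    let w := PySem.List.pyGetD winners (n : Int) ""
    if first.getD w 0 < (n : Int) then w else pvScanBack first winners n

def tourWin1_alt (arr : List (List String)) (target : List Int) : String :=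
  let winners := (PySem.List.pyRange 0 (PySem.List.len arr) 1).map (fun i =>
    if PySem.List.pyGetD target i 0 == 0 then PySem.List.pyGetD (PySem.List.pyGetD arr i []) 1 ""
    else PySem.List.pyGetD (PySem.List.pyGetD arr i []) 0 "")
  let first := (PySem.List.enumerate winners 0).foldl
    (fun d (p : Int × String) => if d.contains p.2 then d else d.insert p.2 p.1) PySem.Dict.empty
  pvScanBack first winners winners.length

-- ===== PRECONDITION & SPEC =====
-- Pre_ excludes exactly the inputs on which Python A raises IndexError: target shorter
-- than arr, or a game row missing the indexed team (index 1 when target[i]==0, else index 0).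
def Pre_tourWin1 (arr : List (List String)) (target : List Int) : Prop :=
  arr.length ≤ target.length ∧
  ∀ i < arr.length, (if target.getD i 0 = 0 then 2 else 1) ≤ (arr.getD i []).length
instance (arr : List (List String)) (target : List Int) : Decidable (Pre_tourWin1 arr target) := by
  unfold Pre_tourWin1; infer_instance
def pvWitness_tourWin1 : List (List String) × List Int :=
  ([["a", "b"], ["b", "c"], ["c", "b"]], [1, 0, 0])
def Spec_tourWin1 (arr : List (List String)) (target : List Int) (out : String) : Prop := out = tourWin1_alt arr target
instance (arr : List (List String)) (target : List Int) (out : String) : Decidable (Spec_tourWin1 arr target out) := by unfold Spec_tourWin1; infer_instance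

-- ===== CLAIM (what is proved, stated in full; the proofs are below) =====
def Claim_equal_tourWin1 : Prop := ∀ (arr : List (List String)) (target : List Int), Dom_tourWin1 arr target → Pre_tourWin1 arr target → Spec_tourWin1 arr target (tourWin1 arr target)

-- ===== LEMMAS AND PROOFS =====

-- the winner of game i, and the winners list, as both ports compute them
def pvF (arr : List (List String)) (target : List Int) (i : Int) : String :=
  if PySem.List.pyGetD target i 0 == 0 then PySem.List.pyGetD (PySem.List.pyGetD arr i []) 1 ""
  else PySem.List.pyGetD (PySem.List.pyGetD arr i []) 0 ""

def pvW (arr : List (List String)) (target : List Int) : List String :=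
  (PySem.List.pyRange 0 (PySem.List.len arr) 1).map (pvF arr target)

def pvFirst (ws : List String) : PySem.Dict String Int :=
  (PySem.List.enumerate ws 0).foldl
    (fun d (p : Int × String) => if d.contains p.2 then d else d.insert p.2 p.1) PySem.Dict.empty

-- reference forward loop: the last winner already seen when it won, else acc
def pvLoop (seen : List String) (acc : String) : List String → String
  | [] => acc
  | w :: ws => if w ∈ seen then pvLoop (w :: seen) w ws else pvLoop (w :: seen) acc ws

theorem pv_idxOf?_of_mem (ws : List String) (w : String) (h : w ∈ ws) :
    List.idxOf? w ws = some (ws.idxOf w) := by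
  induction ws with
  | nil => cases h
  | cons x ws ih =>
    rw [List.idxOf?_cons, List.idxOf_cons]
    by_cases hx : x = w
    · simp [hx]
    · have hm : w ∈ ws := by
        rcases List.mem_cons.1 h with he | hm
        · exact absurd he.symm hx
        · exact hm
      simp [hx, ih hm, Bool.cond_eq_ite, beq_iff_eq]

theorem pv_idxOf_le (w : String) (ws : List String) (j : Nat) (hj : j < ws.length)
    (h : ws[j] = w) : ws.idxOf w ≤ j := by
  induction ws generalizing j with
  | nil => simp at hj
  | cons x ws ih =>
    rw [List.idxOf_cons]
    cases j with
    | zero => simp_all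
    | succ j =>
      have hle := ih j (by simpa using hj) (by simpa using h)
      by_cases hx : x = w
      · simp [hx]
      · simp [hx, Bool.cond_eq_ite, beq_iff_eq]
        omega

theorem pv_mem_take_iff (ws : List String) (w : String) (n : Nat) (hw : w ∈ ws) :
    w ∈ ws.take n ↔ ws.idxOf w < n := by
  constructor
  · intro h
    rcases List.mem_take_iff_getElem.1 h with ⟨j, hj, he⟩
    have := pv_idxOf_le w ws j (by omega) (by simpa using he)
    omega
  · intro h
    have hlt : ws.idxOf w < ws.length := List.idxOf_lt_length_iff.2 hw
    exact List.mem_take_iff_getElem.2 ⟨ws.idxOf w, by omega, List.getElem_idxOf hlt⟩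

theorem pvLoop_append (ws : List String) (w : String) :
    ∀ (seen : List String) (acc : String),
    pvLoop seen acc (ws ++ [w]) = if w ∈ seen ∨ w ∈ ws then w else pvLoop seen acc ws := by
  induction ws with
  | nil => intro seen acc; by_cases h : w ∈ seen <;> simp [pvLoop, h]
  | cons x ws ih =>
    intro seen acc
    have hiff : (w ∈ (x :: seen) ∨ w ∈ ws) ↔ (w ∈ seen ∨ w ∈ x :: ws) := by
      simp only [List.mem_cons]; tauto
    by_cases h1 : x ∈ seen
    · calc pvLoop seen acc ((x :: ws) ++ [w])
          = pvLoop (x :: seen) x (ws ++ [w]) := by simp [pvLoop, h1]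
        _ = if w ∈ (x :: seen) ∨ w ∈ ws then w else pvLoop (x :: seen) x ws := ih _ _
        _ = if w ∈ seen ∨ w ∈ x :: ws then w else pvLoop (x :: seen) x ws := if_congr hiff rfl rfl
        _ = if w ∈ seen ∨ w ∈ x :: ws then w else pvLoop seen acc (x :: ws) := by simp [pvLoop, h1]
    · calc pvLoop seen acc ((x :: ws) ++ [w])
          = pvLoop (x :: seen) acc (ws ++ [w]) := by simp [pvLoop, h1]
        _ = if w ∈ (x :: seen) ∨ w ∈ ws then w else pvLoop (x :: seen) acc ws := ih _ _
        _ = if w ∈ seen ∨ w ∈ x :: ws then w else pvLoop (x :: seen) acc ws := if_congr hiff rfl rfl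
        _ = if w ∈ seen ∨ w ∈ x :: ws then w else pvLoop seen acc (x :: ws) := by simp [pvLoop, h1]

theorem pvFirst_fold_get (ws : List String) :
    ∀ (s : Int) (d : PySem.Dict String Int) (w : String),
    ((PySem.List.enumerate ws s).foldl
        (fun d (p : Int × String) => if d.contains p.2 then d else d.insert p.2 p.1) d).get? w
      = if d.contains w then d.get? w else (List.idxOf? w ws).map (fun k => s + (k : Int)) := by
  induction ws with
  | nil =>
    intro s d w
    by_cases h : d.contains w <;>
      simp [PySem.List.enumerate_nil, h, (PySem.Dict.get?_eq_none_iff_contains d w).2]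
  | cons x ws ih =>
    intro s d w
    rw [PySem.List.enumerate_cons]
    simp only [List.foldl_cons]
    by_cases hx : d.contains x
    · rw [if_pos hx, ih]
      by_cases hxw : x = w
      · subst hxw; simp [hx]
      · rw [List.idxOf?_cons]
        by_cases hw : d.contains w
        · simp [hw]
        · simp only [hw, if_false, beq_iff_eq, hxw]
          cases hk : List.idxOf? w ws
          · simp
          · simp; ring
    · rw [if_neg hx, ih]
      by_cases hxw : x = w
      · subst hxw
        have hc : (d.insert x s).contains x = true := by
          simp
        simp [hx, hc, PySem.Dict.get?_insert_self, List.idxOf?_cons]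
      · have hne : w ≠ x := Ne.symm hxw
        have hcw : (d.insert x s).contains w = d.contains w := by
          simp [PySem.Dict.contains_insert, beq_iff_eq, hne]
        rw [hcw, List.idxOf?_cons]
        by_cases hw : d.contains w
        · simp [hw, PySem.Dict.get?_insert_of_ne d s hne]
        · simp only [hw, if_false, beq_iff_eq, hxw]
          cases hk : List.idxOf? w ws
          · simp
          · simp; ring

theorem pvFirst_getD (ws : List String) (w : String) (hw : w ∈ ws) :
    (pvFirst ws).getD w 0 = (ws.idxOf w : Int) := by
  rw [PySem.Dict.getD_eq_get?_getD]
  unfold pvFirst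
  rw [pvFirst_fold_get ws 0 PySem.Dict.empty w]
  simp [PySem.Dict.contains_empty, pv_idxOf?_of_mem ws w hw]

-- A's loop, abstracted over the winner already computed
theorem pv_foldA (ws : List String) :
    ∀ (table : PySem.Dict String Int) (seen : List String) (acc : String),
    (∀ v, table.contains v = true ↔ v ∈ seen) →
    (ws.foldl (fun (st : PySem.Dict String Int × String) w =>
        if st.1.contains w then (st.1.insert w (st.1.getD w 0 + 1), w)
        else (st.1.insert w 1, st.2)) (table, acc)).2 = pvLoop seen acc ws := by
  induction ws with
  | nil => intro table seen acc _; rfl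
  | cons w ws ih =>
    intro table seen acc hinv
    simp only [List.foldl_cons, pvLoop]
    by_cases hc : table.contains w
    · rw [if_pos hc, if_pos ((hinv w).1 hc)]
      exact ih _ (w :: seen) w (by
        intro v
        simp [PySem.Dict.contains_insert, beq_iff_eq, List.mem_cons, hinv v])
    · rw [if_neg hc, if_neg (fun hm => hc ((hinv w).2 hm))]
      exact ih _ (w :: seen) acc (by
        intro v
        simp [PySem.Dict.contains_insert, beq_iff_eq, List.mem_cons, hinv v])

theorem pv_a_eq (arr : List (List String)) (target : List Int) :
    tourWin1 arr target = pvLoop [] "" (pvW arr target) := by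
  unfold tourWin1 pvW
  have hstep : (fun (st : PySem.Dict String Int × String) (i : Int) =>
      if PySem.List.pyGetD target i 0 == 0 then
        let w := PySem.List.pyGetD (PySem.List.pyGetD arr i []) 1 ""
        if st.1.contains w then (st.1.insert w (st.1.getD w 0 + 1), w)
        else (st.1.insert w 1, st.2)
      else
        let w := PySem.List.pyGetD (PySem.List.pyGetD arr i []) 0 ""
        if st.1.contains w then (st.1.insert w (st.1.getD w 0 + 1), w)
        else (st.1.insert w 1, st.2))
      = fun st i =>
        (fun (st : PySem.Dict String Int × String) w =>
          if st.1.contains w then (st.1.insert w (st.1.getD w 0 + 1), w)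
          else (st.1.insert w 1, st.2)) st (pvF arr target i) := by
    funext st i
    by_cases h : PySem.List.pyGetD target i 0 == 0 <;> simp [pvF, h]
  rw [hstep, ← List.foldl_map (f := pvF arr target)
    (g := fun (st : PySem.Dict String Int × String) w =>
      if st.1.contains w then (st.1.insert w (st.1.getD w 0 + 1), w)
      else (st.1.insert w 1, st.2))]
  exact pv_foldA _ _ _ _ (by intro v; simp [PySem.Dict.contains_empty])

theorem pv_scan (ws : List String) :
    ∀ n, n ≤ ws.length → pvScanBack (pvFirst ws) ws n = pvLoop [] "" (ws.take n) := by
  intro n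
  induction n with
  | zero => intro _; simp [pvScanBack, pvLoop]
  | succ n ih =>
    intro h
    have hn : n < ws.length := by omega
    have hmem : ws[n] ∈ ws := List.getElem_mem hn
    have hget : PySem.List.pyGetD ws (n : Int) "" = ws[n] := by
      rw [PySem.List.pyGetD_natCast]
      exact List.getD_eq_getElem ws "" hn
    show (let w := PySem.List.pyGetD ws (n : Int) ""
          if (pvFirst ws).getD w 0 < (n : Int) then w else pvScanBack (pvFirst ws) ws n)
        = pvLoop [] "" (ws.take (n + 1))
    rw [← List.take_append_getElem hn, pvLoop_append]
    simp only [hget, List.not_mem_nil, false_or]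
    by_cases hlt : ws.idxOf ws[n] < n
    · rw [if_pos (show (pvFirst ws).getD ws[n] 0 < (n : Int) from by
          rw [pvFirst_getD ws ws[n] hmem]; exact_mod_cast hlt),
        if_pos ((pv_mem_take_iff ws ws[n] n hmem).2 hlt)]
    · rw [if_neg (show ¬ (pvFirst ws).getD ws[n] 0 < (n : Int) from by
          rw [pvFirst_getD ws ws[n] hmem]; exact_mod_cast hlt),
        if_neg (fun hm => hlt ((pv_mem_take_iff ws ws[n] n hmem).1 hm))]
      exact ih (by omega)

theorem pv_b_eq (arr : List (List String)) (target : List Int) :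
    tourWin1_alt arr target = pvLoop [] "" (pvW arr target) := by
  have h : tourWin1_alt arr target
      = pvScanBack (pvFirst (pvW arr target)) (pvW arr target) (pvW arr target).length := rfl
  rw [h, pv_scan (pvW arr target) (pvW arr target).length le_rfl, List.take_length]

-- ===== VERDICT (by name: the statement is the Claim_ definition above) =====
theorem tourWin1_spec : Claim_equal_tourWin1 := by
  intro arr target _ _
  unfold Spec_tourWin1
  rw [pv_a_eq, pv_b_eq]
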